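-- pv_equiv track=rewrite | github.com/jjasonn0717/FastFusionNet | qa/ans_extraction_predictor.py | split_batch_dict
-- ===== SOURCE A (Python) =====
-- def split_batch_dict(d):
--     batch_size = len(d[list(d.keys())[0]])
--     assert all([len(v) == batch_size for k, v in d.items()])
--     split_dicts = [{k: None for k in d} for _ in range(batch_size)]
--     for k in d:
--         for i in range(batch_size):
--             split_dicts[i][k] = d[k][i]
--     return split_dicts
-- ===== SOURCE B (Python) =====
-- def split_batch_dict(d):
--     return [dict(zip(d.keys(), row)) for row in zip(*d.values())]
-- ===== Notes on version B (the rewrite author's own statement) =====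
-- stated objective: idiomatic
-- what changed: Replaced A's pre-allocated list of all-None dicts filled cell-by-cell by nested key/index loops with a row-oriented transpose: one comprehension builds each output dict whole from a transposed value row (zip(*d.values())).
import Mathlib
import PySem

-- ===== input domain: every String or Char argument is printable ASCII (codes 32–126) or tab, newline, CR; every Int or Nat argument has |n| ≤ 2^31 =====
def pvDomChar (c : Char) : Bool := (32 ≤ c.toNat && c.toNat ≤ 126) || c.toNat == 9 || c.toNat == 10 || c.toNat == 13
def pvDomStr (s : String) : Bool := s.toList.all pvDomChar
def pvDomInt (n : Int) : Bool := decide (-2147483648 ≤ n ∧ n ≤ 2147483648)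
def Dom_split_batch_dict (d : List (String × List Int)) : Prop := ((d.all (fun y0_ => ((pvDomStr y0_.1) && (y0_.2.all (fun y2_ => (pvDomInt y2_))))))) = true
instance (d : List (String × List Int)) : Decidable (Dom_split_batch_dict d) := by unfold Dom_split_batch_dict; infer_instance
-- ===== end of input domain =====

-- B replaces A's pre-allocated None-dicts filled cell-by-cell by nested loops with a
-- row-oriented transpose (zip of the value lists), building each output dict whole; idiomatic, not faster.

-- ===== PORT A =====
-- Literal port of A.  The input dict is its association list (unique keys under Pre_),
-- viewed as PySem.Dict via Dict.mk.  Python raises (IndexError on the empty dict,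
-- AssertionError on unequal value lengths) exactly outside Pre_; the total pyGetD/getD
-- forms used here are exact on Pre_.  The cell dicts start with None values, so they are
-- Dict String (Option Int) inside the loop; the final .map unwraps the Option that the
-- return type convention forces (under Pre_ every None is overwritten by the loops).
def split_batch_dict (d : List (String × List Int)) : List (List (String × Int)) :=
  let dd : PySem.Dict String (List Int) := PySem.Dict.mk d
  -- batch_size = len(d[list(d.keys())[0]])
  let batch_size : Nat := (dd.getD (PySem.List.pyGetD dd.keys 0 "") []).length
  -- assert all([len(v) == batch_size for k, v in d.items()])  -- guaranteed by Pre_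
  -- split_dicts = [{k: None for k in d} for _ in range(batch_size)]
  let split_dicts : List (PySem.Dict String (Option Int)) :=
    (List.range batch_size).map
      (fun _ => PySem.Dict.mk (dd.keys.map (fun k => (k, (none : Option Int)))))
  -- for k in d: for i in range(batch_size): split_dicts[i][k] = d[k][i]
  let filled : List (PySem.Dict String (Option Int)) :=
    dd.keys.foldl
      (fun sds k =>
        (List.range batch_size).foldl
          (fun sds (i : Nat) =>
            PySem.List.pySetD sds (i : Int)
              ((PySem.List.pyGetD sds (i : Int) PySem.Dict.empty).insert k
                (some (PySem.List.pyGetD (dd.getD k []) (i : Int) 0))))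
          sds)
      split_dicts
  filled.map (fun sd => sd.items.map (fun p => (p.1, p.2.getD 0)))

-- ===== PORT B =====
-- zip(*rows): rows while every list is nonempty; zip of no iterables is empty.
def pvZipStar (ls : List (List Int)) : List (List Int) :=
  if h : ls = [] ∨ ls.any List.isEmpty then []
  else (ls.map (fun l => l.headD 0)) :: pvZipStar (ls.map List.tail)
  termination_by (ls.map List.length).sum
  decreasing_by
    have hne : ls ≠ [] := fun he => h (Or.inl he)
    have hall : ∀ l ∈ ls, l ≠ [] := by
      intro l hl hcon
      exact h (Or.inr (by simp only [List.any_eq_true]; exact ⟨l, hl, by simp [hcon]⟩))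
    have key : ((ls.map List.tail).map List.length).sum < (ls.map List.length).sum := by
      cases ls with
      | nil => exact absurd rfl hne
      | cons l0 rest =>
        simp only [List.map_cons, List.sum_cons, List.map_map]
        have h0 : l0.tail.length < l0.length := by
          cases l0 with
          | nil => exact absurd rfl (hall [] (by simp))
          | cons a t => simp
        have hr : (rest.map (List.length ∘ List.tail)).sum ≤ (rest.map List.length).sum := by
          apply List.sum_le_sum
          intro l _
          simp [List.length_tail]
        omega
    simpa using key

-- return [dict(zip(d.keys(), row)) for row in zip(*d.values())]
-- dict(zip(keys, row)) is ported as the plain zip list: exact on Pre_, where dd.keys is duplicate-free.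
def split_batch_dict_alt (d : List (String × List Int)) : List (List (String × Int)) :=
  let dd : PySem.Dict String (List Int) := PySem.Dict.mk d
  (pvZipStar dd.values).map (fun row => dd.keys.zip row)

-- ===== PRECONDITION & SPEC =====
-- Pre_ excludes: the empty dict (A raises IndexError), unequal value-list lengths
-- (A raises AssertionError), and association lists with duplicate keys, which no Python
-- dict argument can give rise to under the assoc-list convention.
def Pre_split_batch_dict (d : List (String × List Int)) : Prop :=
  d ≠ [] ∧ (d.map Prod.fst).Nodup ∧
    ∀ p ∈ d, p.2.length = (d.headD ("", [])).2.length
instance (d : List (String × List Int)) : Decidable (Pre_split_batch_dict d) := by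
  unfold Pre_split_batch_dict; infer_instance

def pvWitness_split_batch_dict : (List (String × List Int)) :=
  [("a", [1, 2]), ("b", [3, 4])]

def Spec_split_batch_dict (d : List (String × List Int)) (out : List (List (String × Int))) : Prop := out = split_batch_dict_alt d
instance (d : List (String × List Int)) (out : List (List (String × Int))) : Decidable (Spec_split_batch_dict d out) := by unfold Spec_split_batch_dict; infer_instance

-- ===== CLAIM (what is proved, stated in full; the proofs are below) =====
def Claim_equal_split_batch_dict : Prop := ∀ (d : List (String × List Int)), Dom_split_batch_dict d → Pre_split_batch_dict d → Spec_split_batch_dict d (split_batch_dict d)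

-- ===== LEMMAS AND PROOFS =====

-- the common normal form: row i pairs each key with element i of its value list
def pvRows (d : List (String × List Int)) (n : Nat) : List (List (String × Int)) :=
  (List.range n).map (fun i => d.map (fun p => (p.1, p.2.getD i 0)))

-- pvZipStar on equal-length nonempty input is the transpose
theorem pvZipStar_eq (n : Nat) : ∀ (vs : List (List Int)), vs ≠ [] →
    (∀ v ∈ vs, v.length = n) →
    pvZipStar vs = (List.range n).map (fun i => vs.map (fun v => v.getD i 0)) := by
  induction n with
  | zero =>
    intro vs hne hlen
    rw [pvZipStar]
    have : vs.any List.isEmpty := by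
      cases vs with
      | nil => exact absurd rfl hne
      | cons v rest =>
        have : v = [] := List.eq_nil_of_length_eq_zero (hlen v (by simp))
        simp [this]
    simp [this]
  | succ n ih =>
    intro vs hne hlen
    have hall : ∀ v ∈ vs, v ≠ [] := by
      intro v hv hcon
      have := hlen v hv
      simp [hcon] at this
    rw [pvZipStar]
    have hcond : ¬ (vs = [] ∨ vs.any List.isEmpty) := by
      rintro (h | h)
      · exact hne h
      · simp only [List.any_eq_true] at h
        obtain ⟨v, hv, he⟩ := h
        exact hall v hv (by simpa using he)
    rw [dif_neg hcond]
    rw [ih (vs.map List.tail) (by simpa using hne)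
        (by intro v hv
            simp only [List.mem_map] at hv
            obtain ⟨w, hw, rfl⟩ := hv
            have := hlen w hw
            simp [List.length_tail, this])]
    rw [List.range_succ_eq_map, List.map_cons, List.map_map]
    congr 1
    · apply List.map_congr_left
      intro v hv
      cases v with
      | nil => exact absurd rfl (hall [] hv)
      | cons a t => simp
    · apply List.map_congr_left
      intro i _
      simp only [Function.comp, List.map_map]
      apply List.map_congr_left
      intro v hv
      cases v with
      | nil => exact absurd rfl (hall [] hv)
      | cons a t => simp

-- a loop 'for i in range(m): s[i] = g(i, s[i])' rewrites the first m cells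
theorem pvSetFold {α : Type} (g : Nat → α → α) (dflt : α) (sds : List α) :
    ∀ (m : Nat), m ≤ sds.length →
    (List.range m).foldl (fun s i => s.set i (g i (s.getD i dflt))) sds
      = (List.range m).map (fun i => g i (sds.getD i dflt)) ++ sds.drop m := by
  intro m
  induction m with
  | zero => simp
  | succ m ih =>
    intro hm
    rw [List.range_succ, List.foldl_append, ih (by omega), List.map_append]
    simp only [List.foldl_cons, List.foldl_nil, List.map_cons, List.map_nil]
    have hlt : m < sds.length := by omega
    have hdrop : sds.drop m = sds[m] :: sds.drop (m + 1) := by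
      rw [List.drop_eq_getElem_cons hlt]
    have hlenmap : ((List.range m).map (fun i => g i (sds.getD i dflt))).length = m := by simp
    conv_lhs => rw [hdrop]
    rw [List.getD_append_right _ _ _ _ (by omega), List.set_append_right _ _ (by omega)]
    simp only [hlenmap, Nat.sub_self, List.append_assoc, List.singleton_append]
    congr 1
    simp [List.getD_eq_getElem?_getD, hlt]
    exact (congrArg (fun t : List α => t.set 0 (g m sds[m])) hdrop).trans rfl

-- A's inner index loop, in pySetD/pyGetD form, pointwise
theorem pvInner_eq (n : Nat) (g : Nat → PySem.Dict String (Option Int) → PySem.Dict String (Option Int))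
    (sds : List (PySem.Dict String (Option Int))) (h : sds.length = n) :
    (List.range n).foldl
      (fun s (i : Nat) => PySem.List.pySetD s (i : Int)
        (g i (PySem.List.pyGetD s (i : Int) PySem.Dict.empty))) sds
    = (List.range n).map (fun i => g i (sds.getD i PySem.Dict.empty)) := by
  have hsf := pvSetFold g PySem.Dict.empty sds n (le_of_eq h.symm)
  simp only [PySem.List.pySetD_natCast, PySem.List.pyGetD_natCast]
  rw [hsf, List.drop_eq_nil_of_le (le_of_eq h), List.append_nil]

-- A's two nested loops act independently on each cell dict
theorem pvOuter_eq (n : Nat) (val : String → Nat → Option Int) :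
    ∀ (ks : List String) (sds : List (PySem.Dict String (Option Int))), sds.length = n →
    ks.foldl
      (fun sds k =>
        (List.range n).foldl
          (fun s (i : Nat) => PySem.List.pySetD s (i : Int)
            ((PySem.List.pyGetD s (i : Int) PySem.Dict.empty).insert k (val k i))) sds)
      sds
    = (List.range n).map (fun i => ks.foldl (fun sd k => sd.insert k (val k i)) (sds.getD i PySem.Dict.empty)) := by
  intro ks
  induction ks with
  | nil =>
    intro sds hlen
    simp only [List.foldl_nil]
    apply List.ext_getElem (by simp [hlen])
    intro i h1 h2
    simp only [List.getElem_map, List.getElem_range]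
    rw [List.getD_eq_getElem?_getD]
    simp only [hlen] at h1
    simp [List.getElem?_eq_getElem (by omega : i < sds.length)]
  | cons k rest ih =>
    intro sds hlen
    simp only [List.foldl_cons]
    rw [pvInner_eq n (fun i sd => sd.insert k (val k i)) sds hlen]
    rw [ih _ (by simp)]
    apply List.map_congr_left
    intro i hi
    have hin : i < n := List.mem_range.mp hi
    rw [PySem.List.getD_map_range _ _ _ _ hin]

-- overwriting every (nodup) key of a dict that already holds them all
theorem pvFoldInsert_eq (f : String → Option Int) :
    ∀ (ks : List String) (pre : List (String × Option Int)),
      ks.Nodup → (∀ q ∈ pre, q.1 ∉ ks) →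
      (ks.foldl (fun sd k => sd.insert k (f k))
        (PySem.Dict.mk (pre ++ ks.map (fun k => (k, (none : Option Int)))))).items
      = pre ++ ks.map (fun k => (k, f k)) := by
  intro ks
  induction ks with
  | nil => simp
  | cons k rest ih =>
    intro pre hnd hpre
    have hknotin : k ∉ rest := (List.nodup_cons.mp hnd).1
    have hndrest : rest.Nodup := (List.nodup_cons.mp hnd).2
    simp only [List.foldl_cons]
    have hcont : (PySem.Dict.mk (pre ++ (k, (none : Option Int)) :: rest.map (fun k => (k, (none : Option Int))))).contains k = true := by
      rw [PySem.Dict.contains_mk]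
      simp
    have hitems : ((PySem.Dict.mk (pre ++ (k, (none : Option Int)) :: rest.map (fun k => (k, (none : Option Int))))).insert k (f k)).items
        = (pre ++ [(k, f k)]) ++ rest.map (fun k => (k, (none : Option Int))) := by
      rw [PySem.Dict.items_insert_of_contains _ _ hcont]
      show List.map _ (pre ++ (k, (none : Option Int)) :: rest.map (fun k => (k, (none : Option Int)))) = _
      rw [List.map_append, List.map_cons, List.map_map]
      have h1 : pre.map (fun p => if (p.1 == k) = true then (k, f k) else p) = pre := by
        have : pre.map (fun p => if (p.1 == k) = true then (k, f k) else p) = pre.map id := by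
          apply List.map_congr_left
          intro q hq
          have hq1 : q.1 ≠ k := fun he => hpre q hq (he ▸ List.mem_cons_self)
          simp [hq1]
        rw [this, List.map_id]
      have h2 : rest.map ((fun p => if (p.1 == k) = true then (k, f k) else p) ∘ (fun k => (k, (none : Option Int)))) = rest.map (fun k => (k, (none : Option Int))) := by
        apply List.map_congr_left
        intro x hx
        have : x ≠ k := fun he => hknotin (he ▸ hx)
        simp [Function.comp, this]
      rw [h1, h2]
      simp
    have hd : ((PySem.Dict.mk (pre ++ (k, (none : Option Int)) :: rest.map (fun k => (k, (none : Option Int))))).insert k (f k))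
        = PySem.Dict.mk ((pre ++ [(k, f k)]) ++ rest.map (fun k => (k, (none : Option Int)))) := by
      have := hitems
      cases hins : ((PySem.Dict.mk (pre ++ (k, (none : Option Int)) :: rest.map (fun k => (k, (none : Option Int))))).insert k (f k))
      simp_all
    simp only [List.map_cons] at *
    rw [hd, ih (pre ++ [(k, f k)]) hndrest]
    · simp
    · intro q hq
      rcases List.mem_append.mp hq with h | h
      · intro hin
        exact hpre q h (List.mem_cons_of_mem _ hin)
      · intro hin
        simp only [List.mem_singleton] at h
        subst h
        exact hknotin hin

theorem portA_eq_rows (d : List (String × List Int)) (h : Pre_split_batch_dict d) :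
    split_batch_dict d = pvRows d ((d.headD ("", [])).2.length) := by
  obtain ⟨hne, hnd, hlen⟩ := h
  cases d with
  | nil => exact absurd rfl hne
  | cons p rest =>
  obtain ⟨k0, v0⟩ := p
  simp only [List.headD_cons]
  unfold split_batch_dict
  simp only [PySem.Dict.keys_mk]
  have hkey0 : PySem.List.pyGetD (((k0, v0) :: rest).map Prod.fst) 0 "" = k0 := by
    rw [PySem.List.pyGetD_zero]; rfl
  have hnodkeys : ((PySem.Dict.mk ((k0, v0) :: rest)).keys).Nodup := by
    rw [PySem.Dict.keys_mk]; exact hnd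
  have hget0 : (PySem.Dict.mk ((k0, v0) :: rest)).getD k0 [] = v0 :=
    PySem.Dict.getD_of_mem_items _ (by exact List.mem_cons_self) hnodkeys []
  rw [hkey0, hget0]
  set n := v0.length with hn
  set dd := PySem.Dict.mk ((k0, v0) :: rest) with hdd
  set ks := ((k0, v0) :: rest).map Prod.fst with hks
  rw [pvOuter_eq n (fun k i => some (PySem.List.pyGetD (dd.getD k []) (i : Int) 0)) ks
      ((List.range n).map (fun _ => PySem.Dict.mk (ks.map (fun k => (k, (none : Option Int)))))) (by simp)]
  rw [List.map_map]
  unfold pvRows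
  apply List.map_congr_left
  intro i hi
  have hin : i < n := List.mem_range.mp hi
  simp only [Function.comp]
  rw [PySem.List.getD_map_range _ _ _ _ hin]
  have hfold := pvFoldInsert_eq (fun k => some (PySem.List.pyGetD (dd.getD k []) (i : Int) 0)) ks [] hnd (by simp)
  simp only [List.nil_append] at hfold
  rw [hfold, List.map_map, hks, List.map_map]
  apply List.map_congr_left
  intro q hq
  have hgq : dd.getD q.1 [] = q.2 :=
    PySem.Dict.getD_of_mem_items _ (by exact hq) hnodkeys []
  simp only [Function.comp]
  rw [hgq, PySem.List.pyGetD_natCast]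
  simp

theorem portB_eq_rows (d : List (String × List Int)) (h : Pre_split_batch_dict d) :
    split_batch_dict_alt d = pvRows d ((d.headD ("", [])).2.length) := by
  obtain ⟨hne, hnd, hlen⟩ := h
  unfold split_batch_dict_alt
  simp only [PySem.Dict.keys_mk, PySem.Dict.values_mk]
  rw [pvZipStar_eq ((d.headD ("", [])).2.length) (d.map (fun x => x.2))
      (by simpa using hne)
      (by intro v hv
          simp only [List.mem_map] at hv
          obtain ⟨q, hq, rfl⟩ := hv
          exact hlen q hq)]
  rw [List.map_map]
  unfold pvRows
  apply List.map_congr_left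
  intro i _
  simp only [Function.comp, List.map_map]
  rw [List.zip_map']
  rfl

-- ===== VERDICT (by name: the statement is the Claim_ definition above) =====
theorem split_batch_dict_spec : Claim_equal_split_batch_dict := by
  intro d _ hpre
  unfold Spec_split_batch_dict
  rw [portA_eq_rows d hpre, portB_eq_rows d hpre]
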